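-- pv_equiv track=rewrite | github.com/sh1doy/AntBook | sec2_7/Crazy_Rows.py | solve
-- ===== SOURCE A (Python) =====
-- def solve(l):
-- 	l1=[]
-- 	for i in l:
-- 		n=0
-- 		for j in range(len(i)):
-- 			if i[j]==1:
-- 				n=j+1
-- 		l1.append(n)
-- 	c=0
-- 	for i in range(len(l1)):
-- 		if l1[i]>i+1:
-- 			for j in range(i+1,len(l1)):
-- 				if l1[j]<=i+1:
-- 					l1.insert(i,l1.pop(j))
-- 					c+=j-i
-- 					break
-- 	return(c)
-- ===== SOURCE B (Python) =====
-- def rowval(row):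
--     # last-1 position, scanned from the right (stops at first hit)
--     for j in range(len(row) - 1, -1, -1):
--         if row[j] == 1:
--             return j + 1
--     return 0
--
--
-- def _go(rem, i):
--     # greedy on the remaining suffix of row values, position i
--     if not rem:
--         return 0
--     x, rest = rem[0], rem[1:]
--     if x <= i + 1:
--         return _go(rest, i + 1)
--     for j, y in enumerate(rest, 1):
--         if y <= i + 1:
--             return j + _go([x] + rest[:j - 1] + rest[j:], i + 1)
--     return _go(rest, i + 1)
--
--
-- def solve(l):
--     return _go([rowval(r) for r in l], 0)
-- ===== Notes on version B (the rewrite author's own statement) =====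
-- stated objective: alternative
-- what changed: A mutates a single list in place with insert/pop under absolute indices inside an index loop; B computes each row's last-1 position by a right-to-left scan that stops at the first 1 and replaces the in-place simulation by a recursion on the remaining suffix of row values with relative indices.
import Mathlib
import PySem

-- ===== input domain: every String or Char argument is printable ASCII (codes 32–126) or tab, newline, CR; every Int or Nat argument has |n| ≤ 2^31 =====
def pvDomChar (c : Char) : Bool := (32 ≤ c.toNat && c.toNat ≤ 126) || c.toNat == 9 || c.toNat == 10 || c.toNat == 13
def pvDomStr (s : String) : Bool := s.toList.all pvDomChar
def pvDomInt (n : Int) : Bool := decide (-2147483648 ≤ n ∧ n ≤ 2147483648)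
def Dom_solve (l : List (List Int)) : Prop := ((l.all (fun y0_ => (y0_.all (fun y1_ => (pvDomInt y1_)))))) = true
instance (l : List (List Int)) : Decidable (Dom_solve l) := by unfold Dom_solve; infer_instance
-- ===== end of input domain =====

-- ===== PORT A =====
-- B differs from A by a different decomposition: A mutates one list in place with
-- insert/pop under absolute indices; B computes row values by a right-to-left scan and
-- recurses on the remaining suffix (objective: alternative; no speed claim).
-- Port of A's per-row loop: n=0; for j in range(len(i)): if i[j]==1: n=j+1
-- (index j is always in range, so `getD _ 0` is exact for i[j])
def rowA (row : List Int) : Int :=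
  (List.range row.length).foldl (fun n j => if row.getD j 0 = 1 then ((j : Int) + 1) else n) 0

-- Port of A's main loop body for one index i (the inner for/break is a first-match search)
def stepA (st : List Int × Int) (i : Nat) : List Int × Int :=
  let l1 := st.1
  let c := st.2
  if ((i : Int) + 1) < l1.getD i 0 then
    match (List.range' (i + 1) (l1.length - (i + 1))).find? (fun j => l1.getD j 0 ≤ (i : Int) + 1) with
    | some j => ((l1.eraseIdx j).insertIdx i (l1.getD j 0), c + ((j : Int) - (i : Int)))
    | none => (l1, c)
  else (l1, c)

def solve (l : List (List Int)) : Int :=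
  let l1 := l.map rowA
  ((List.range l1.length).foldl stepA (l1, 0)).2

-- ===== PORT B =====
-- Port of B's rowval: for j in range(len(row)-1,-1,-1): if row[j]==1: return j+1; return 0
def rowB_aux (row : List Int) : Nat → Int
  | 0 => 0
  | k + 1 => if row.getD k 0 = 1 then ((k : Int) + 1) else rowB_aux row k

def rowB (row : List Int) : Int := rowB_aux row row.length

-- findIdx? returning some k implies k < length (termination of goB, eraseIdx lengths)
theorem findIdx?_some_lt {p : Int → Bool} :
    ∀ {rest : List Int} {k : Nat}, rest.findIdx? p = some k → k < rest.length
  | [], _, h => by simp at h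
  | a :: t, k, h => by
    rw [List.findIdx?_cons] at h
    split at h
    · simp at h
      simp
      omega
    · rw [Option.map_eq_some_iff] at h
      obtain ⟨m, hm, rfl⟩ := h
      have := findIdx?_some_lt hm
      simp
      omega

-- Port of B's _go: recursion on the suffix of remaining row values
def goB : List Int → Nat → Int
  | [], _ => 0
  | x :: rest, i =>
    if x ≤ (i : Int) + 1 then goB rest (i + 1)
    else
      match h : rest.findIdx? (fun y => y ≤ (i : Int) + 1) with
      | some k => ((k : Int) + 1) + goB (x :: rest.eraseIdx k) (i + 1)
      | none => goB rest (i + 1)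
termination_by rem _ => rem.length
decreasing_by
  · simp
  · have hk : k < rest.length := findIdx?_some_lt h
    have := List.length_eraseIdx_of_lt hk
    simp only [List.length_cons]
    omega
  · simp

def solve_alt (l : List (List Int)) : Int := goB (l.map rowB) 0

-- ===== PRECONDITION & SPEC =====
def Spec_solve (l : List (List Int)) (out : Int) : Prop := out = solve_alt l
instance (l : List (List Int)) (out : Int) : Decidable (Spec_solve l out) := by unfold Spec_solve; infer_instance

-- ===== CLAIM (what is proved, stated in full; the proofs are below) =====
def Claim_equal_solve : Prop := ∀ (l : List (List Int)), Dom_solve l → Spec_solve l (solve l)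

-- ===== LEMMAS AND PROOFS =====

-- the per-row values agree: forward "keep last match" = backward "first match"
theorem rowA_eq_rowB (row : List Int) : rowA row = rowB row := by
  unfold rowA rowB
  induction row.length with
  | zero => simp [rowB_aux]
  | succ n ih =>
    rw [List.range_succ, List.foldl_append]
    simp only [List.foldl_cons, List.foldl_nil, rowB_aux]
    rw [ih]

theorem getD_append_len {done rem : List Int} {x : Int} :
    (done ++ x :: rem).getD done.length 0 = x := by
  simp [List.getD]

theorem getD_append_len_add {done rem : List Int} {t : Nat} :
    (done ++ rem).getD (done.length + t) 0 = rem.getD t 0 := by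
  simp [List.getD, List.getElem?_append_right (Nat.le_add_right done.length t)]

theorem eraseIdx_append_len_add {done rem : List Int} {t : Nat} :
    (done ++ rem).eraseIdx (done.length + t) = done ++ rem.eraseIdx t := by
  induction done with
  | nil => simp
  | cons a d ih => simpa [List.eraseIdx, Nat.succ_add] using ih

theorem insertIdx_append_len {done rem : List Int} {v : Int} :
    (done ++ rem).insertIdx done.length v = done ++ v :: rem := by
  induction done with
  | nil => simp
  | cons a d ih => simpa [List.insertIdx] using ih

-- A's inner search over absolute indices = B's findIdx? over the suffix
theorem find_range'_eq_findIdx (p : Int → Bool) :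
    ∀ (rest : List Int) (pre : List Int),
      (List.range' pre.length rest.length).find? (fun j => p ((pre ++ rest).getD j 0))
        = (rest.findIdx? p).map (fun k => pre.length + k) := by
  intro rest
  induction rest with
  | nil => intro pre; simp
  | cons y rest' ih =>
    intro pre
    rw [List.length_cons, List.range'_succ, List.find?_cons, List.findIdx?_cons]
    have hy : (pre ++ y :: rest').getD pre.length 0 = y := getD_append_len
    by_cases hp : p y
    · simp [hp]
    · have := ih (pre ++ [y])
      simp only [List.length_append, List.length_cons, List.length_nil, List.append_assoc,
        List.cons_append, List.nil_append] at this
      simp only [hy, hp, Bool.false_eq_true, if_false]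
      rw [this]
      cases rest'.findIdx? p
      · simp
      · simp
        omega

-- main loop invariant: A's fold from index i over (done ++ rem) computes c + goB rem i
theorem loop_inv : ∀ (n : Nat) (rem done : List Int) (c : Int), rem.length = n →
    ((List.range' done.length n).foldl stepA (done ++ rem, c)).2 = c + goB rem done.length := by
  intro n
  induction n with
  | zero =>
    intro rem done c hlen
    have : rem = [] := List.eq_nil_of_length_eq_zero hlen
    subst this
    simp [goB]
  | succ n ih =>
    intro rem done c hlen
    match rem, hlen with
    | x :: rest, hlen =>
      have hlen' : rest.length = n := by simpa using hlen
      rw [List.range'_succ, List.foldl_cons]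
      have hx : (done ++ x :: rest).getD done.length 0 = x := getD_append_len
      by_cases hle : x ≤ (done.length : Int) + 1
      · have hstep : stepA (done ++ x :: rest, c) done.length = (done ++ x :: rest, c) := by
          simp [stepA, not_lt.mpr hle]
        rw [hstep]
        have := ih rest (done ++ [x]) c hlen'
        simp only [List.length_append, List.length_cons, List.length_nil,
          List.append_assoc, List.cons_append, List.nil_append] at this
        rw [this, goB]
        simp [hle]
      · -- x > i + 1 : search for a fitting later row
        have hfind := find_range'_eq_findIdx (fun y => decide (y ≤ (done.length : Int) + 1))
          (x :: rest) done
        have hlen1 : (done ++ x :: rest).length - (done.length + 1) = rest.length := by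
          simp; omega
        rw [goB]
        simp only [hle, if_false]
        cases hk : rest.findIdx? (fun y => decide (y ≤ (done.length : Int) + 1)) with
        | none =>
          have hstep : stepA (done ++ x :: rest, c) done.length = (done ++ x :: rest, c) := by
            unfold stepA
            simp only [hx, if_pos (not_le.mp hle)]
            have : ((done ++ x :: rest).length - (done.length + 1)) = rest.length := hlen1
            rw [this]
            have h2 : (List.range' (done.length + 1) rest.length).find?
                (fun j => decide ((done ++ x :: rest).getD j 0 ≤ (done.length : Int) + 1)) = none := by
              have := find_range'_eq_findIdx (fun y => decide (y ≤ (done.length : Int) + 1))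
                rest (done ++ [x])
              simp only [List.length_append, List.length_nil, List.length_cons,
                List.append_assoc, List.cons_append, List.nil_append, hk, Option.map_none] at this
              exact this
            rw [h2]
          rw [hstep]
          dsimp only
          have := ih rest (done ++ [x]) c hlen'
          simp only [List.length_append, List.length_cons, List.length_nil,
            List.append_assoc, List.cons_append, List.nil_append] at this
          rw [this]
        | some k =>
          have hklt : k < rest.length := findIdx?_some_lt hk
          have hstep : stepA (done ++ x :: rest, c) done.length
              = (done ++ (rest.getD k 0) :: x :: rest.eraseIdx k,
                 c + ((k : Int) + 1)) := by
            unfold stepA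
            simp only [hx, if_pos (not_le.mp hle)]
            rw [hlen1]
            have h2 : (List.range' (done.length + 1) rest.length).find?
                (fun j => decide ((done ++ x :: rest).getD j 0 ≤ (done.length : Int) + 1))
                = some (done.length + 1 + k) := by
              have := find_range'_eq_findIdx (fun y => decide (y ≤ (done.length : Int) + 1))
                rest (done ++ [x])
              simp only [List.length_append, List.length_nil, List.length_cons,
                List.append_assoc, List.cons_append, List.nil_append, hk, Option.map_some] at this
              simpa using this
            rw [h2]
            have hget : (done ++ x :: rest).getD (done.length + 1 + k) 0 = rest.getD k 0 := by
              have : done.length + 1 + k = done.length + (1 + k) := by omega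
              rw [this, getD_append_len_add]
              simp [List.getD, Nat.add_comm 1 k]
            have herase : (done ++ x :: rest).eraseIdx (done.length + 1 + k)
                = done ++ x :: rest.eraseIdx k := by
              have : done.length + 1 + k = done.length + (1 + k) := by omega
              rw [this, eraseIdx_append_len_add]
              rw [Nat.add_comm 1 k]
              rfl
            have hins : (done ++ x :: rest.eraseIdx k).insertIdx done.length (rest.getD k 0)
                = done ++ (rest.getD k 0) :: x :: rest.eraseIdx k := insertIdx_append_len
            simp only [hget, herase, hins]
            congr 1
            push_cast
            ring
          rw [hstep]
          dsimp only
          have hrem' : (x :: rest.eraseIdx k).length = n := by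
            have := List.length_eraseIdx_of_lt hklt
            simp [this]; omega
          have := ih (x :: rest.eraseIdx k) (done ++ [rest.getD k 0]) (c + ((k : Int) + 1)) hrem'
          simp only [List.length_append, List.length_cons, List.length_nil,
            List.append_assoc, List.cons_append, List.nil_append] at this
          rw [this]
          ring

-- ===== VERDICT (by name: the statement is the Claim_ definition above) =====
theorem solve_spec : Claim_equal_solve := by
  intro l _
  unfold Spec_solve solve solve_alt
  show (List.foldl stepA (List.map rowA l, 0) (List.range (List.map rowA l).length)).2
      = goB (List.map rowB l) 0
  have hmap : l.map rowA = l.map rowB := List.map_congr_left (fun r _ => rowA_eq_rowB r)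
  have := loop_inv (l.map rowA).length (l.map rowA) [] 0 rfl
  simp only [List.length_nil, List.nil_append] at this
  rw [List.range_eq_range']
  rw [this, hmap]
  simp
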